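-- pv_equiv track=rewrite | github.com/TheDeaderzOne/USACO-Gold | HighCardLowCardGold (2015 Dec Gold P1).py | LowCardGreedy
-- ===== SOURCE A (Python) =====
-- def LowCardGreedy(BeList,ElList):
--     vins = 0
--     pointer = 0
--     while pointer != len(ElList):
--         if BeList[0]<ElList[pointer]:
--             vins+=1
--             BeList.pop(0)
--             pointer+=1
--         else:
--             pointer+=1
--     return vins
-- ===== SOURCE B (Python) =====
-- def LowCardGreedy(BeList, ElList):
--     # Single pass with an index into BeList instead of pop(0); does not mutate BeList.
--     k = 0
--     for e in ElList:
--         if k < len(BeList) and BeList[k] < e: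
--             k += 1
--     return k
-- ===== Notes on version B (the rewrite author's own statement) =====
-- stated objective: faster
-- what changed: B replaces the while-loop that repeatedly pops the head of BeList (O(n) per pop) with a single pass keeping an integer index into the unmodified BeList, returning the index (= number of wins); B does not mutate BeList.
import Mathlib
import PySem

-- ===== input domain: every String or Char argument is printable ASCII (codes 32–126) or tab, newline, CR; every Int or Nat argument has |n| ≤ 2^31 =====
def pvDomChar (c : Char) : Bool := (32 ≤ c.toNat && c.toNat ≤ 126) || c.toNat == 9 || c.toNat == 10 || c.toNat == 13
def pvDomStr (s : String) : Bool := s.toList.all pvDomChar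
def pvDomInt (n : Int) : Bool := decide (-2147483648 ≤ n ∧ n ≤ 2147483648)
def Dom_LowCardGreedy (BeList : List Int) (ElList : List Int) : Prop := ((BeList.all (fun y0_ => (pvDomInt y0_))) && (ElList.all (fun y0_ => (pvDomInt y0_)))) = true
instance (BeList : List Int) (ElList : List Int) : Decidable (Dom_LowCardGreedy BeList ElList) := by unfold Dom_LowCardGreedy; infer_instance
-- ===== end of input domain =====

-- B replaces A's repeated pop(0) scan with one indexed pass over ElList (asymptotically faster);
-- return value only: A mutates BeList (pops won cards), B leaves it untouched.


-- ===== PORT A =====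
-- A's while loop: pointer walks ElList; the branch reads BeList[0] (IndexError on empty,
-- excluded by Pre_) and on a win pops the head. Recursion on the remaining ElList suffix.
def pvLoopA : List Int → List Int → Int → Int
  | _, [], vins => vins
  | be, e :: rest, vins =>
    match be with
    | [] => vins          -- Python raises IndexError here; outside Pre_
    | b :: bs => if b < e then pvLoopA bs rest (vins + 1) else pvLoopA (b :: bs) rest vins

def LowCardGreedy (BeList : List Int) (ElList : List Int) : Int :=
  pvLoopA BeList ElList 0

-- ===== PORT B =====
-- B's for loop over ElList carrying the index k into the unmodified BeList.
def pvLoopB (be : List Int) : List Int → Int → Int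
  | [], k => k
  | e :: rest, k =>
    if k < (be.length : Int) ∧ (PySem.List.pyGet? be k).getD 0 < e then
      pvLoopB be rest (k + 1)
    else
      pvLoopB be rest k

def LowCardGreedy_alt (BeList : List Int) (ElList : List Int) : Int :=
  pvLoopB BeList ElList 0

-- ===== PRECONDITION & SPEC =====
-- pvCanEmbed be el decides a structural property of the input: whether BeList embeds
-- order-preservingly into el with every card strictly beaten (the standard linear-time
-- subsequence-domination check).
def pvCanEmbed : List Int → List Int → Bool
  | [], _ => true
  | _ :: _, [] => false
  | b :: bs, e :: es => if b < e then pvCanEmbed bs es else pvCanEmbed (b :: bs) es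

-- Pre_ excludes exactly the inputs on which A raises IndexError: those where every BeList
-- card is beaten, in order, within ElList minus its last element (then A reads the head of
-- an emptied BeList). A returns on every input admitted here.
def Pre_LowCardGreedy (BeList : List Int) (ElList : List Int) : Prop :=
  ElList = [] ∨ pvCanEmbed BeList ElList.dropLast = false
instance (BeList : List Int) (ElList : List Int) : Decidable (Pre_LowCardGreedy BeList ElList) := by
  unfold Pre_LowCardGreedy; infer_instance

def pvWitness_LowCardGreedy : List Int × List Int := ([1, 5, 3], [2, 4])

def Spec_LowCardGreedy (BeList : List Int) (ElList : List Int) (out : Int) : Prop := out = LowCardGreedy_alt BeList ElList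
instance (BeList : List Int) (ElList : List Int) (out : Int) : Decidable (Spec_LowCardGreedy BeList ElList out) := by unfold Spec_LowCardGreedy; infer_instance

-- ===== CLAIM (what is proved, stated in full; the proofs are below) =====
def Claim_equal_LowCardGreedy : Prop := ∀ (BeList : List Int) (ElList : List Int), Dom_LowCardGreedy BeList ElList → Pre_LowCardGreedy BeList ElList → Spec_LowCardGreedy BeList ElList (LowCardGreedy BeList ElList)

-- ===== LEMMAS AND PROOFS =====

-- Invariant: after n wins A works on BeList.drop n while B's index is n; as long as the
-- remaining BeList is never exhausted before the last ElList element (the Pre_ condition,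
-- carried through the loop), the two loops track each other.
lemma pvLoop_key (el : List Int) : ∀ (full : List Int) (n : Nat) (v : Int),
    (el = [] ∨ pvCanEmbed (full.drop n) el.dropLast = false) →
    pvLoopA (full.drop n) el v = v + (pvLoopB full el (n : Int) - n) := by
  induction el with
  | nil => intro full n v _; simp [pvLoopA, pvLoopB]
  | cons e rest ih =>
    intro full n v h
    have h' : pvCanEmbed (full.drop n) (e :: rest).dropLast = false := by
      rcases h with h | h
      · exact absurd h (by simp)
      · exact h
    cases hdropeq : full.drop n with
    | nil =>
      -- impossible: an empty BeList embeds into anything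
      exfalso
      rw [hdropeq] at h'
      cases (e :: rest).dropLast <;> simp [pvCanEmbed] at h'
    | cons b bs =>
      have hn : n < full.length := by
        by_contra hge
        rw [List.drop_eq_nil_of_le (by omega)] at hdropeq
        simp at hdropeq
      have hb : full[n] = b := by
        have := List.drop_eq_getElem_cons hn
        rw [hdropeq] at this
        exact (List.cons.injEq _ _ _ _ ▸ this).1.symm
      have hbs : full.drop (n + 1) = bs := by
        have := List.drop_eq_getElem_cons hn
        rw [hdropeq] at this
        exact (List.cons.injEq _ _ _ _ ▸ this).2.symm
      have hget : PySem.List.pyGet? full (n : Int) = some b := by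
        rw [PySem.List.pyGet?_ofNat full n hn, hb]
      rw [hdropeq] at h'
      by_cases hc : b < e
      · have hrec : rest = [] ∨ pvCanEmbed (full.drop (n + 1)) rest.dropLast = false := by
          cases rest with
          | nil => exact Or.inl rfl
          | cons r rs =>
            right
            rw [hbs]
            have : (e :: r :: rs).dropLast = e :: (r :: rs).dropLast := by simp
            rw [this] at h'
            simpa [pvCanEmbed, hc] using h'
        have ihs := ih full (n + 1) (v + 1) hrec
        rw [hbs] at ihs
        simp only [pvLoopA, if_pos hc]
        simp only [pvLoopB, hget, Option.getD_some]
        rw [if_pos ⟨by exact_mod_cast hn, hc⟩]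
        push_cast at ihs ⊢
        omega
      · have hrec : rest = [] ∨ pvCanEmbed (full.drop n) rest.dropLast = false := by
          cases rest with
          | nil => exact Or.inl rfl
          | cons r rs =>
            right
            rw [hdropeq]
            have : (e :: r :: rs).dropLast = e :: (r :: rs).dropLast := by simp
            rw [this] at h'
            simpa [pvCanEmbed, hc] using h'
        have ihs := ih full n v hrec
        rw [hdropeq] at ihs
        simp only [pvLoopA, if_neg hc]
        simp only [pvLoopB, hget, Option.getD_some]
        rw [if_neg (by rintro ⟨-, hlt⟩; exact hc hlt)]
        exact ihs

-- ===== VERDICT (by name: the statements are the Claim_ definitions above) =====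
theorem LowCardGreedy_spec : Claim_equal_LowCardGreedy := by
  intro be el _ hpre
  unfold Spec_LowCardGreedy LowCardGreedy LowCardGreedy_alt
  have h : el = [] ∨ pvCanEmbed (be.drop 0) el.dropLast = false := by
    simpa using hpre
  have := pvLoop_key el be 0 0 h
  simpa using this
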